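-- pv_equiv track=rewrite | github.com/SantiagoFolatti/Santiago_Folatti_FINAL | funciones_categorias.py | seleccionar_pregunta_por_categoria
-- ===== SOURCE A (Python) =====
-- def seleccionar_pregunta_por_categoria(preguntas_restantes: list, categoria_elegida: str, dificultad:str) -> dict:
--     pregunta_seleccionada = None
--     nuevas_preguntas = []
--
--     for pregunta in preguntas_restantes:
--         if not pregunta_seleccionada and pregunta["categoria"].strip().lower() == categoria_elegida and pregunta["dificultad"].strip().lower() == dificultad.strip().lower():
--             pregunta_seleccionada = pregunta
--         else:
--             nuevas_preguntas.append(pregunta)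
--
--     return pregunta_seleccionada, nuevas_preguntas
-- ===== SOURCE B (Python) =====
-- def seleccionar_pregunta_por_categoria(preguntas_restantes: list, categoria_elegida: str, dificultad: str) -> dict:
--     dif = dificultad.strip().lower()
--     idx = next((i for i, p in enumerate(preguntas_restantes)
--                 if p["categoria"].strip().lower() == categoria_elegida
--                 and p["dificultad"].strip().lower() == dif),
--                None)
--     if idx is None:
--         return None, list(preguntas_restantes)
--     return preguntas_restantes[idx], preguntas_restantes[:idx] + preguntas_restantes[idx + 1:]
-- ===== Notes on version B (the rewrite author's own statement) =====
-- stated objective: alternative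
-- what changed: Replaced A's single select-and-accumulate loop (flag + growing accumulator list) by a locate-first-matching-index pass (next over enumerate) followed by a slice rebuild preguntas_restantes[:i] + preguntas_restantes[i+1:], with the difficulty string normalized once up front.
import Mathlib
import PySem

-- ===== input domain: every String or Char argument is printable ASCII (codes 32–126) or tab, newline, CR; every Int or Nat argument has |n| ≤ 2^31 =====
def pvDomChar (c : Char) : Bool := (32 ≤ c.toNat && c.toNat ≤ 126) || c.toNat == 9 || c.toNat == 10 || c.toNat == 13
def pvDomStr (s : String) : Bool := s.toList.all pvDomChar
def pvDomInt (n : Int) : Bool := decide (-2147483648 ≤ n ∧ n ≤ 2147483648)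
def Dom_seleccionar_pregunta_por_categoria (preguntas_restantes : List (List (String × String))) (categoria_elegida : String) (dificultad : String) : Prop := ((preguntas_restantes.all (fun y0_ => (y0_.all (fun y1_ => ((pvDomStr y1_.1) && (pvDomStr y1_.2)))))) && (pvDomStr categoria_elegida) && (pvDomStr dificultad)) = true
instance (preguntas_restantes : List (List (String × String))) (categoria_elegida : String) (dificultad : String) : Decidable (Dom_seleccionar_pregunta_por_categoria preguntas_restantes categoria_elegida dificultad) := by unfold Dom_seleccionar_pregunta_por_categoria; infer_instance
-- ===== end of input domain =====

-- B replaces A's select-and-accumulate loop with a locate-first-match-index pass followed by a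
-- slice rebuild (same O(n) cost, different decomposition); equivalence is about the return value.

-- shared small helpers: pregunta[k] lookup and .strip().lower() normalization (both Pythons do these)
def pvKey (p : List (String × String)) (k : String) : Option String :=
  PySem.Dict.get? (PySem.Dict.mk p) k

def pvNorm (s : String) : String := PySem.Str.lower (PySem.Str.strip s)

-- the if-condition's key comparisons (missing key read as "", only reachable outside Pre_)
def pvMatch (cat difn : String) (p : List (String × String)) : Bool :=
  pvNorm ((pvKey p "categoria").getD "") == cat && pvNorm ((pvKey p "dificultad").getD "") == difn

-- ===== PORT A =====
-- A's for-loop: state = (pregunta_seleccionada, nuevas_preguntas); `not pregunta_seleccionada`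
-- is true for None and for an (unreachable inside Pre_) empty selected dict
def pvLoopA (cat dif : String) :
    List (List (String × String)) → Option (List (String × String)) → List (List (String × String)) →
    (Option (List (String × String))) × (List (List (String × String)))
  | [], sel, acc => (sel, acc)
  | p :: rest, sel, acc =>
    if ((match sel with | none => true | some d => d.isEmpty) && pvMatch cat (pvNorm dif) p) then
      pvLoopA cat dif rest (some p) acc
    else
      pvLoopA cat dif rest sel (acc ++ [p])

def seleccionar_pregunta_por_categoria (preguntas_restantes : List (List (String × String))) (categoria_elegida : String) (dificultad : String) : (Option (List (String × String))) × (List (List (String × String))) :=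
  pvLoopA categoria_elegida dificultad preguntas_restantes none []

-- ===== PORT B =====
-- Source B: normalize dificultad once, find the index of the first match, then slice-rebuild
def seleccionar_pregunta_por_categoria_alt (preguntas_restantes : List (List (String × String))) (categoria_elegida : String) (dificultad : String) : (Option (List (String × String))) × (List (List (String × String))) :=
  let difn := pvNorm dificultad
  match preguntas_restantes.findIdx? (fun p => pvMatch categoria_elegida difn p) with
  | none => (none, preguntas_restantes)
  | some i => (preguntas_restantes[i]?, preguntas_restantes.take i ++ preguntas_restantes.drop (i + 1))

-- ===== PRECONDITION & SPEC =====
-- exact match predicate (both keys present) and the no-KeyError condition for a scanned element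
def pvMatchP (cat difn : String) (p : List (String × String)) : Bool :=
  match pvKey p "categoria", pvKey p "dificultad" with
  | some c, some d => pvNorm c == cat && pvNorm d == difn
  | _, _ => false

def pvOk (cat : String) (p : List (String × String)) : Bool :=
  match pvKey p "categoria" with
  | none => false
  | some c => if pvNorm c == cat then (pvKey p "dificultad").isSome else true

-- Pre_ excludes exactly the inputs on which A raises KeyError: some question scanned before the
-- first full match lacks "categoria", or matches on categoria but lacks "dificultad" (B raises there too).
def Pre_seleccionar_pregunta_por_categoria (preguntas_restantes : List (List (String × String))) (categoria_elegida : String) (dificultad : String) : Prop :=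
  ∀ p ∈ preguntas_restantes.takeWhile (fun p => !pvMatchP categoria_elegida (pvNorm dificultad) p),
    pvOk categoria_elegida p = true

instance (preguntas_restantes : List (List (String × String))) (categoria_elegida : String) (dificultad : String) : Decidable (Pre_seleccionar_pregunta_por_categoria preguntas_restantes categoria_elegida dificultad) := by unfold Pre_seleccionar_pregunta_por_categoria; infer_instance

def pvWitness_seleccionar_pregunta_por_categoria : (List (List (String × String))) × String × String :=
  ([[("categoria", "Geo "), ("dificultad", "Alta")], [("categoria", "geo"), ("dificultad", " alta")]], "geo", "ALTA ")

def Spec_seleccionar_pregunta_por_categoria (preguntas_restantes : List (List (String × String))) (categoria_elegida : String) (dificultad : String) (out : (Option (List (String × String))) × (List (List (String × String)))) : Prop := out = seleccionar_pregunta_por_categoria_alt preguntas_restantes categoria_elegida dificultad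
instance (preguntas_restantes : List (List (String × String))) (categoria_elegida : String) (dificultad : String) (out : (Option (List (String × String))) × (List (List (String × String)))) : Decidable (Spec_seleccionar_pregunta_por_categoria preguntas_restantes categoria_elegida dificultad out) := by unfold Spec_seleccionar_pregunta_por_categoria; infer_instance

-- ===== CLAIM (what is proved, stated in full; the proofs are below) =====
def Claim_equal_seleccionar_pregunta_por_categoria : Prop := ∀ (preguntas_restantes : List (List (String × String))) (categoria_elegida : String) (dificultad : String), Dom_seleccionar_pregunta_por_categoria preguntas_restantes categoria_elegida dificultad → Pre_seleccionar_pregunta_por_categoria preguntas_restantes categoria_elegida dificultad → Spec_seleccionar_pregunta_por_categoria preguntas_restantes categoria_elegida dificultad (seleccionar_pregunta_por_categoria preguntas_restantes categoria_elegida dificultad)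

-- ===== LEMMAS AND PROOFS =====

-- an exact match has both keys, so the matched dict is non-empty
theorem pvMatchP_ne_nil {cat difn : String} {p : List (String × String)}
    (h : pvMatchP cat difn p = true) : p ≠ [] := by
  intro rfl_
  subst rfl_
  simp [pvMatchP, pvKey,
    show PySem.Dict.mk ([] : List (String × String)) = PySem.Dict.empty from rfl] at h

-- an exact match also satisfies the defaulted comparison
theorem pvMatch_of_pvMatchP {cat difn : String} {p : List (String × String)}
    (h : pvMatchP cat difn p = true) : pvMatch cat difn p = true := by
  unfold pvMatchP at h
  unfold pvMatch
  cases hc : pvKey p "categoria" with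
  | none => simp [hc] at h
  | some c =>
    cases hd : pvKey p "dificultad" with
    | none => simp [hc, hd] at h
    | some d =>
      simp only [hc, hd] at h
      simp [h]

-- on a KeyError-free element the defaulted comparison agrees with the exact one
theorem pvMatch_eq_pvMatchP {cat difn : String} {p : List (String × String)}
    (h : pvOk cat p = true) : pvMatch cat difn p = pvMatchP cat difn p := by
  unfold pvOk at h
  unfold pvMatch pvMatchP
  cases hc : pvKey p "categoria" with
  | none => simp [hc] at h
  | some c =>
    rw [hc] at h
    cases hd : pvKey p "dificultad" with
    | none =>
      rw [hd] at h
      cases hcc : (pvNorm c == cat) with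
      | false => simp [hcc]
      | true => simp [hcc] at h
    | some d => simp

-- once a non-empty pregunta is selected, the loop only appends the rest
theorem pvLoopA_selected (cat dif : String) (l : List (List (String × String)))
    (d : List (String × String)) (acc : List (List (String × String))) (hd : d ≠ []) :
    pvLoopA cat dif l (some d) acc = (some d, acc ++ l) := by
  induction l generalizing acc with
  | nil => simp [pvLoopA]
  | cons p rest ih =>
    have hde : d.isEmpty = false := by simp [List.isEmpty_eq_false_iff, hd]
    simp only [pvLoopA, hde, Bool.false_and, Bool.false_eq_true, if_false]
    rw [ih]
    simp

-- main invariant: with no selection yet, the loop is findIdx? + slice rebuild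
theorem pvLoopA_none (cat dif : String) (l : List (List (String × String)))
    (acc : List (List (String × String)))
    (hpre : ∀ p ∈ l.takeWhile (fun p => !pvMatchP cat (pvNorm dif) p), pvOk cat p = true) :
    pvLoopA cat dif l none acc =
      match l.findIdx? (fun p => pvMatch cat (pvNorm dif) p) with
      | none => (none, acc ++ l)
      | some i => (l[i]?, acc ++ (l.take i ++ l.drop (i + 1))) := by
  induction l generalizing acc with
  | nil => simp [pvLoopA]
  | cons p rest ih =>
    by_cases hm : pvMatch cat (pvNorm dif) p = true
    · -- first match: p must be an exact match (else Pre_ forces pvOk, contradiction)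
      have hMP : pvMatchP cat (pvNorm dif) p = true := by
        by_contra hnot
        have hin : p ∈ (p :: rest).takeWhile (fun p => !pvMatchP cat (pvNorm dif) p) := by
          simp [eq_false_of_ne_true hnot]
        have hok := hpre p hin
        rw [pvMatch_eq_pvMatchP hok] at hm
        exact hnot hm
      have hne : p ≠ [] := pvMatchP_ne_nil hMP
      simp only [pvLoopA, hm, Bool.and_true]
      rw [pvLoopA_selected cat dif rest p acc hne]
      simp [List.findIdx?_cons, hm]
    · have hm' : pvMatch cat (pvNorm dif) p = false := eq_false_of_ne_true hm
      have hMP' : pvMatchP cat (pvNorm dif) p = false := by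
        cases h : pvMatchP cat (pvNorm dif) p with
        | false => rfl
        | true => exact absurd (pvMatch_of_pvMatchP h) hm
      have hpre' : ∀ q ∈ rest.takeWhile (fun p => !pvMatchP cat (pvNorm dif) p), pvOk cat q = true := by
        intro q hq
        apply hpre q
        simp only [List.takeWhile_cons, hMP', Bool.not_false, if_true]
        exact List.mem_cons_of_mem _ hq
      simp only [pvLoopA, Bool.true_and, hm', Bool.false_eq_true, if_false]
      rw [ih (acc ++ [p]) hpre']
      cases hfi : rest.findIdx? (fun p => pvMatch cat (pvNorm dif) p) with
      | none => simp [List.findIdx?_cons, hm', hfi]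
      | some i => simp [List.findIdx?_cons, hm', hfi, List.take_succ_cons, List.drop_succ_cons]

-- ===== VERDICT (by name: the statement is the Claim_ definition above) =====
theorem seleccionar_pregunta_por_categoria_spec : Claim_equal_seleccionar_pregunta_por_categoria := by
  intro l cat dif _hdom hpre
  unfold Spec_seleccionar_pregunta_por_categoria
  unfold seleccionar_pregunta_por_categoria seleccionar_pregunta_por_categoria_alt
  rw [pvLoopA_none cat dif l [] hpre]
  cases hfi : l.findIdx? (fun p => pvMatch cat (pvNorm dif) p) <;> simp [hfi]
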